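-- pv_equiv track=rewrite | github.com/lumusa2design/algorithm_arena | sorting/bitonic_sort.py | _bitonic_merge
-- ===== SOURCE A (Python) =====
-- def _bitonic_merge(arr, low, cnt, ascending):
--     if cnt > 1:
--         k = cnt // 2
--         for i in range(low, low + k):
--             yield ("compare", i, i + k)
--             if (arr[i] > arr[i + k]) == ascending:
--                 arr[i], arr[i + k] = arr[i + k], arr[i]
--                 yield ("swap", i, i + k)
--         yield from _bitonic_merge(arr, low, k, ascending)
--         yield from _bitonic_merge(arr, low + k, k, ascending)
-- ===== SOURCE B (Python) =====
-- def _bitonic_merge(arr, low, cnt, ascending):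
--     # Two phases: build the data-independent comparison network (the schedule of
--     # index pairs in the order A would visit them), then execute it in one pass.
--     # Correct because a bitonic merge is a sorting network: the compare pairs and
--     # their order never depend on the array contents.
--     def schedule(lo, c):
--         if c <= 1:
--             return []
--         k = c // 2
--         return ([(i, i + k) for i in range(lo, lo + k)]
--                 + schedule(lo, k) + schedule(lo + k, k))
--
--     for i, j in schedule(low, cnt):
--         yield ("compare", i, j)
--         if (arr[i] > arr[j]) == ascending:
--             arr[i], arr[j] = arr[j], arr[i]
--             yield ("swap", i, j)
-- ===== Notes on version B (the rewrite author's own statement) =====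
-- stated objective: alternative
-- what changed: B splits the task into two phases: it first builds the data-independent comparison network (the ordered list of index pairs, by a pure recursion with no array access), then executes that schedule in a single pass over the pair list doing the compares, swaps and event emission; A interleaves event generation, array access and recursion.
import Mathlib
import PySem

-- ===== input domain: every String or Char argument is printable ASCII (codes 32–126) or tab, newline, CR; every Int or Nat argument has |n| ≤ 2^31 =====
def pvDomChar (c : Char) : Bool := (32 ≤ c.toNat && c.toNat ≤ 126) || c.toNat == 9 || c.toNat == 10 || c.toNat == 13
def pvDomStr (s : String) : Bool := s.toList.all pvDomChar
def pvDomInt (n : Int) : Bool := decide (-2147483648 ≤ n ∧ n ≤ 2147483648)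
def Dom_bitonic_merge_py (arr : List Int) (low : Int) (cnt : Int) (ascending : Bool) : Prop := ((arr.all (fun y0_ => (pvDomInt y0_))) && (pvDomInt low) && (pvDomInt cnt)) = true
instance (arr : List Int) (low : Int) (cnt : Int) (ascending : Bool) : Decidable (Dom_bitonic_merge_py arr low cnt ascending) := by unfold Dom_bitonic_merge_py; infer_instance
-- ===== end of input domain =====

-- ===== PORT A =====
-- B replaces A's recursive generator by two phases: build the data-independent
-- comparison network (schedule of index pairs), then execute it in one pass
-- (objective: alternative decomposition, same cost).  A and B both mutate `arr`
-- in place identically; the theorems are about the returned event list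
-- (the ports thread the array state explicitly).

-- the inner compare/swap for-loop of A, threading (array, events)
def loopA : List Int → List Int → Int → Bool → List Int × List (String × Int × Int)
  | arr, [], _, _ => (arr, [])
  | arr, i :: is, k, asc =>
    match PySem.List.pyGet? arr i, PySem.List.pyGet? arr (i + k) with
    | some a, some b =>
      if (decide (a > b)) == asc then
        match PySem.List.pySet? arr i b with
        | some arr1 =>
          match PySem.List.pySet? arr1 (i + k) a with
          | some arr2 =>
            let r := loopA arr2 is k asc
            (r.1, ("compare", i, i + k) :: ("swap", i, i + k) :: r.2)
          | none => (arr1, [("compare", i, i + k)])   -- Python raises IndexError here (outside Pre_)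
        | none => (arr, [("compare", i, i + k)])      -- Python raises IndexError here (outside Pre_)
      else
        let r := loopA arr is k asc
        (r.1, ("compare", i, i + k) :: r.2)
    | _, _ => (arr, [("compare", i, i + k)])          -- Python raises IndexError here (outside Pre_)

def mergeA (arr : List Int) (low : Int) (cnt : Int) (asc : Bool) :
    List Int × List (String × Int × Int) :=
  if _h : cnt > 1 then
    let k := PySem.Int.floordiv cnt 2
    let r1 := loopA arr (PySem.List.pyRange low (low + k) 1) k asc
    let r2 := mergeA r1.1 low k asc
    let r3 := mergeA r2.1 (low + k) k asc
    (r3.1, r1.2 ++ (r2.2 ++ r3.2))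
  else (arr, [])
termination_by cnt.toNat
decreasing_by
  all_goals (rw [PySem.Int.floordiv_eq_ediv_of_pos (by omega)]; omega)

def bitonic_merge_py (arr : List Int) (low : Int) (cnt : Int) (ascending : Bool) : List (String × Int × Int) :=
  (mergeA arr low cnt ascending).2

-- ===== PORT B =====
-- phase 1 of B: the schedule of compare pairs (a pure sorting network; no array)
def netB (low : Int) (cnt : Int) : List (Int × Int) :=
  if _h : cnt > 1 then
    let k := PySem.Int.floordiv cnt 2
    (PySem.List.pyRange low (low + k) 1).map (fun i => (i, i + k))
      ++ netB low k ++ netB (low + k) k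
  else []
termination_by cnt.toNat
decreasing_by
  all_goals (rw [PySem.Int.floordiv_eq_ediv_of_pos (by omega)]; omega)

-- phase 2 of B: one step of the execution pass; the state is the array (none once
-- Python's IndexError has fired — the rest of the loop is dead) plus the events so far
def stepB (asc : Bool) (st : Option (List Int) × List (String × Int × Int))
    (p : Int × Int) : Option (List Int) × List (String × Int × Int) :=
  match st.1 with
  | none => st
  | some arr =>
    match PySem.List.pyGet? arr p.1, PySem.List.pyGet? arr p.2 with
    | some a, some b =>
      if (decide (a > b)) == asc then
        ((PySem.List.pySet? arr p.1 b).bind (fun arr1 => PySem.List.pySet? arr1 p.2 a),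
         st.2 ++ [("compare", p.1, p.2), ("swap", p.1, p.2)])
      else (some arr, st.2 ++ [("compare", p.1, p.2)])
    | _, _ => (none, st.2 ++ [("compare", p.1, p.2)])

def bitonic_merge_py_alt (arr : List Int) (low : Int) (cnt : Int) (ascending : Bool) : List (String × Int × Int) :=
  ((netB low cnt).foldl (stepB ascending) (some arr, [])).2

-- ===== PRECONDITION & SPEC =====
-- Pre_ excludes exactly the inputs on which Python A raises IndexError: when cnt > 1
-- the merge reads/writes every index in [low, low + 2*(cnt//2)), so all those indices
-- must be valid Python indices of arr (negative indices count from the end).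
def Pre_bitonic_merge_py (arr : List Int) (low : Int) (cnt : Int) (ascending : Bool) : Prop :=
  cnt ≤ 1 ∨ (-(arr.length : Int) ≤ low ∧ low + 2 * PySem.Int.floordiv cnt 2 ≤ (arr.length : Int))
instance (arr : List Int) (low : Int) (cnt : Int) (ascending : Bool) : Decidable (Pre_bitonic_merge_py arr low cnt ascending) := by unfold Pre_bitonic_merge_py; infer_instance

def pvWitness_bitonic_merge_py : List Int × Int × Int × Bool := ([3, 1, 2, 4], 0, 4, true)

def Spec_bitonic_merge_py (arr : List Int) (low : Int) (cnt : Int) (ascending : Bool) (out : List (String × Int × Int)) : Prop := out = bitonic_merge_py_alt arr low cnt ascending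
instance (arr : List Int) (low : Int) (cnt : Int) (ascending : Bool) (out : List (String × Int × Int)) : Decidable (Spec_bitonic_merge_py arr low cnt ascending out) := by unfold Spec_bitonic_merge_py; infer_instance

-- ===== CLAIM (what is proved, stated in full; the proofs are below) =====
def Claim_equal_bitonic_merge_py : Prop := ∀ (arr : List Int) (low : Int) (cnt : Int) (ascending : Bool), Dom_bitonic_merge_py arr low cnt ascending → Pre_bitonic_merge_py arr low cnt ascending → Spec_bitonic_merge_py arr low cnt ascending (bitonic_merge_py arr low cnt ascending)

-- ===== LEMMAS AND PROOFS =====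

-- proof-only recursive form of B's execution pass (early stop on error)
def execR (asc : Bool) : Option (List Int) → List (Int × Int) → Option (List Int) × List (String × Int × Int)
  | none, _ => (none, [])
  | some arr, [] => (some arr, [])
  | some arr, (i, j) :: ps =>
    match PySem.List.pyGet? arr i, PySem.List.pyGet? arr j with
    | some a, some b =>
      if (decide (a > b)) == asc then
        let r := execR asc ((PySem.List.pySet? arr i b).bind
          (fun arr1 => PySem.List.pySet? arr1 j a)) ps
        (r.1, ("compare", i, j) :: ("swap", i, j) :: r.2)
      else
        let r := execR asc (some arr) ps
        (r.1, ("compare", i, j) :: r.2)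
    | _, _ => (none, [("compare", i, j)])

theorem foldl_stepB_eq_execR (asc : Bool) (ps : List (Int × Int)) :
    ∀ (o : Option (List Int)) (acc : List (String × Int × Int)),
    ps.foldl (stepB asc) (o, acc) = ((execR asc o ps).1, acc ++ (execR asc o ps).2) := by
  induction ps with
  | nil =>
    intro o acc
    cases o <;> simp [execR]
  | cons p ps ih =>
    intro o acc
    cases o with
    | none => simp [List.foldl_cons, stepB, execR, ih]
    | some arr =>
      obtain ⟨i, j⟩ := p
      simp only [List.foldl_cons, stepB, execR]
      cases hgi : PySem.List.pyGet? arr i with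
      | none => simp [ih, execR]
      | some a =>
        cases hgj : PySem.List.pyGet? arr j with
        | none => simp [ih, execR]
        | some b =>
          by_cases hc : (decide (a > b)) == asc
          · simp [hc, ih]
          · simp [hc, ih]

theorem execR_append (asc : Bool) (xs : List (Int × Int)) :
    ∀ (o : Option (List Int)) (ys : List (Int × Int)),
    execR asc o (xs ++ ys) =
      ((execR asc (execR asc o xs).1 ys).1,
       (execR asc o xs).2 ++ (execR asc (execR asc o xs).1 ys).2) := by
  induction xs with
  | nil =>
    intro o ys
    cases o with
    | none => simp [execR]
    | some arr => simp [execR]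
  | cons p xs ih =>
    intro o ys
    cases o with
    | none => simp [execR]
    | some arr =>
      obtain ⟨i, j⟩ := p
      simp only [List.cons_append, execR]
      cases hgi : PySem.List.pyGet? arr i with
      | none => simp [execR]
      | some a =>
        cases hgj : PySem.List.pyGet? arr j with
        | none => simp [execR]
        | some b =>
          by_cases hc : (decide (a > b)) == asc
          · simp [hc, ih]
          · simp [hc, ih]

-- pySet? succeeds and preserves length on a valid index
theorem pySet?_some_len {xs : List Int} {i : Int} (v : Int)
    (h : PySem.Raise.InRange xs.length i) :
    ∃ ys, PySem.List.pySet? xs i v = some ys ∧ ys.length = xs.length := by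
  cases hs : PySem.List.pySet? xs i v with
  | none => exact absurd ((PySem.List.pySet?_eq_none_iff xs i v).1 hs) (not_not_intro h)
  | some ys =>
    refine ⟨ys, rfl, ?_⟩
    · unfold PySem.List.pySet? at hs
      cases hidx : PySem.List.pyIdx? xs.length i with
      | none => rw [hidx] at hs; simp at hs
      | some n =>
        rw [hidx] at hs
        simp at hs
        subst hs
        simp

theorem pyGet?_some_of_inRange {xs : List Int} {i : Int}
    (h : PySem.Raise.InRange xs.length i) :
    ∃ a, PySem.List.pyGet? xs i = some a := by
  cases hg : PySem.List.pyGet? xs i with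
  | none => exact absurd ((PySem.List.pyGet?_eq_none_iff _ _).1 hg) (not_not_intro h)
  | some a => exact ⟨a, rfl⟩

-- the execution pass agrees with A's inner loop on valid indices
theorem exec_eq_loopA (asc : Bool) (k : Int) (L : Nat) (idxs : List Int) :
    ∀ (arr : List Int), arr.length = L →
    (∀ i ∈ idxs, PySem.Raise.InRange L i ∧ PySem.Raise.InRange L (i + k)) →
    execR asc (some arr) (idxs.map (fun i => (i, i + k))) =
      (some (loopA arr idxs k asc).1, (loopA arr idxs k asc).2) ∧
    (loopA arr idxs k asc).1.length = L := by
  induction idxs with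
  | nil => intro arr hL _; exact ⟨by simp [execR, loopA], by simpa [loopA]⟩
  | cons i is ih =>
    intro arr hL hv
    have hvi := hv i (by simp)
    have hvs : ∀ x ∈ is, PySem.Raise.InRange L x ∧ PySem.Raise.InRange L (x + k) :=
      fun x hx => hv x (by simp [hx])
    obtain ⟨a, hga⟩ := pyGet?_some_of_inRange (xs := arr) (i := i) (by rw [hL]; exact hvi.1)
    obtain ⟨b, hgb⟩ := pyGet?_some_of_inRange (xs := arr) (i := i + k) (by rw [hL]; exact hvi.2)
    simp only [List.map_cons, execR, loopA, hga, hgb]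
    by_cases hc : (decide (a > b)) == asc
    · obtain ⟨arr1, hs1, hl1⟩ := pySet?_some_len (xs := arr) (i := i) b (by rw [hL]; exact hvi.1)
      obtain ⟨arr2, hs2, hl2⟩ := pySet?_some_len (xs := arr1) (i := i + k) a
        (by rw [hl1, hL]; exact hvi.2)
      have hL2 : arr2.length = L := by rw [hl2, hl1, hL]
      obtain ⟨he, hlen⟩ := ih arr2 hL2 hvs
      simp [hc, hs1, hs2, he, hlen]
    · obtain ⟨he, hlen⟩ := ih arr hL hvs
      simp [hc, he, hlen]

-- zeta-free unfolding equations for mergeA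
theorem mergeA_pos (arr : List Int) (low cnt : Int) (asc : Bool) (h : cnt > 1) :
    mergeA arr low cnt asc =
      ((mergeA (mergeA (loopA arr (PySem.List.pyRange low (low + PySem.Int.floordiv cnt 2) 1) (PySem.Int.floordiv cnt 2) asc).1 low (PySem.Int.floordiv cnt 2) asc).1 (low + PySem.Int.floordiv cnt 2) (PySem.Int.floordiv cnt 2) asc).1,
       (loopA arr (PySem.List.pyRange low (low + PySem.Int.floordiv cnt 2) 1) (PySem.Int.floordiv cnt 2) asc).2 ++
       ((mergeA (loopA arr (PySem.List.pyRange low (low + PySem.Int.floordiv cnt 2) 1) (PySem.Int.floordiv cnt 2) asc).1 low (PySem.Int.floordiv cnt 2) asc).2 ++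
        (mergeA (mergeA (loopA arr (PySem.List.pyRange low (low + PySem.Int.floordiv cnt 2) 1) (PySem.Int.floordiv cnt 2) asc).1 low (PySem.Int.floordiv cnt 2) asc).1 (low + PySem.Int.floordiv cnt 2) (PySem.Int.floordiv cnt 2) asc).2)) := by
  rw [mergeA, dif_pos h]

theorem mergeA_neg (arr : List Int) (low cnt : Int) (asc : Bool) (h : ¬ cnt > 1) :
    mergeA arr low cnt asc = (arr, []) := by
  rw [mergeA, dif_neg h]

theorem netB_pos (low cnt : Int) (h : cnt > 1) :
    netB low cnt =
      (PySem.List.pyRange low (low + PySem.Int.floordiv cnt 2) 1).map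
          (fun i => (i, i + PySem.Int.floordiv cnt 2))
        ++ netB low (PySem.Int.floordiv cnt 2)
        ++ netB (low + PySem.Int.floordiv cnt 2) (PySem.Int.floordiv cnt 2) := by
  rw [netB, dif_pos h]

theorem netB_neg (low cnt : Int) (h : ¬ cnt > 1) : netB low cnt = [] := by
  rw [netB, dif_neg h]

-- main bridge: executing the network = A's recursive merge (under Pre_)
theorem exec_netB_eq_mergeA (asc : Bool) (L : Nat) (n : Nat) :
    ∀ (cnt low : Int) (arr : List Int), cnt.toNat ≤ n → arr.length = L →
    (cnt ≤ 1 ∨ (-(L : Int) ≤ low ∧ low + 2 * PySem.Int.floordiv cnt 2 ≤ (L : Int))) →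
    execR asc (some arr) (netB low cnt) =
      (some (mergeA arr low cnt asc).1, (mergeA arr low cnt asc).2) ∧
    (mergeA arr low cnt asc).1.length = L := by
  induction n with
  | zero =>
    intro cnt low arr hn hL _
    have h1 : ¬ cnt > 1 := by omega
    rw [netB_neg _ _ h1, mergeA_neg _ _ _ _ h1]
    exact ⟨by simp [execR], by simpa⟩
  | succ n ih =>
    intro cnt low arr hn hL hpre
    by_cases h : cnt > 1
    · have hpre' := hpre.resolve_left (by omega)
      have hkd : PySem.Int.floordiv cnt 2 = cnt / 2 :=
        PySem.Int.floordiv_eq_ediv_of_pos (by omega)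
      have hk2d : PySem.Int.floordiv (PySem.Int.floordiv cnt 2) 2 = cnt / 2 / 2 := by
        rw [hkd]; exact PySem.Int.floordiv_eq_ediv_of_pos (by omega)
      rw [hkd] at hpre'
      have hk1 : 1 ≤ PySem.Int.floordiv cnt 2 := by rw [hkd]; omega
      have hkn : (PySem.Int.floordiv cnt 2).toNat ≤ n := by rw [hkd]; omega
      have hv : ∀ i ∈ PySem.List.pyRange low (low + PySem.Int.floordiv cnt 2) 1,
          PySem.Raise.InRange L i ∧ PySem.Raise.InRange L (i + PySem.Int.floordiv cnt 2) := by
        intro i hi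
        rw [PySem.List.mem_pyRange_one, hkd] at hi
        constructor
        · rw [PySem.Raise.InRange]; omega
        · rw [PySem.Raise.InRange, hkd]; omega
      obtain ⟨he1, hl1⟩ := exec_eq_loopA asc (PySem.Int.floordiv cnt 2) L
        (PySem.List.pyRange low (low + PySem.Int.floordiv cnt 2) 1) arr hL hv
      obtain ⟨he2, hl2⟩ := ih (PySem.Int.floordiv cnt 2) low
        (loopA arr (PySem.List.pyRange low (low + PySem.Int.floordiv cnt 2) 1)
          (PySem.Int.floordiv cnt 2) asc).1 hkn hl1
        (Or.inr ⟨by omega, by rw [hk2d]; omega⟩)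
      obtain ⟨he3, hl3⟩ := ih (PySem.Int.floordiv cnt 2) (low + PySem.Int.floordiv cnt 2)
        (mergeA (loopA arr (PySem.List.pyRange low (low + PySem.Int.floordiv cnt 2) 1)
          (PySem.Int.floordiv cnt 2) asc).1 low (PySem.Int.floordiv cnt 2) asc).1 hkn hl2
        (Or.inr ⟨by rw [hkd]; omega, by rw [hk2d, hkd]; omega⟩)
      rw [netB_pos _ _ h, mergeA_pos _ _ _ _ h]
      rw [execR_append, execR_append]
      simp only [he1, he2, he3]
      exact ⟨by simp [List.append_assoc], hl3⟩
    · rw [netB_neg _ _ h, mergeA_neg _ _ _ _ h]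
      exact ⟨by simp [execR], by simpa⟩

-- ===== VERDICT (by name: the statement is the Claim_ definition above) =====
theorem bitonic_merge_py_spec : Claim_equal_bitonic_merge_py := by
  intro arr low cnt ascending _ hpre
  unfold Spec_bitonic_merge_py bitonic_merge_py bitonic_merge_py_alt
  rw [foldl_stepB_eq_execR]
  obtain ⟨he, _⟩ := exec_netB_eq_mergeA ascending arr.length cnt.toNat cnt low arr le_rfl rfl hpre
  rw [he]
  simp
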